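-- pv_equiv track=rewrite | github.com/jamescs92/projects | GO_agent/funcs.py | identify_dead
-- ===== SOURCE A (Python) =====
-- def check_group(board,currentMembers,freedomGroup, iden):
--     nextGroup = []
--     addList = [[-1,0],[0,1],[1,0],[0,-1]]
--     #for all members of the group
--     for member in currentMembers:
--         #for each neighbor
--         for index in addList:
--             testpoint = [member[0]+index[0], member[1] + index[1]]
--             #check if in bounds
--             if testpoint[0] < 0 or testpoint[0] > 4 or testpoint[1] < 0 or testpoint[1] > 4:
--                 continue
--
--             #check if it is a freedom
--             if board[testpoint[0]][testpoint[1]] == 0: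
--                 #check if it is in the freedomGroup, add if it is not
--                 if testpoint not in freedomGroup:
--                     freedomGroup.append(testpoint)
--
--             #check if it is our piece.
--             if board[testpoint[0]][testpoint[1]] == iden:
--                 #it is our piece.  add to nextGroup if it is not already in there
--                 if testpoint not in nextGroup and testpoint not in currentMembers:
--                     nextGroup.append(testpoint)
--
--     if nextGroup == []:
--         return(currentMembers,freedomGroup)
--     else:
--         currentMembers.extend(nextGroup)
--         return(check_group(board,currentMembers,freedomGroup,iden))
--
-- def get_groups(board, iden):
--     alreadyCounted = []
--     groupList=[]
--     for i in range(0,5):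
--         for j in range(0,5):
--             #check if it is same iden
--             if board[i][j] != iden:
--                 continue
--
--             #check if it already belongs to a group
--             if [i,j] in alreadyCounted:
--                 continue
--             else:
--                 answer = check_group(board,[[i,j]],[],iden)
--                 groupList.append(answer)
--                 alreadyCounted.extend(answer[0])
--     return groupList
--
-- def identify_dead(board,iden):
--     deadGroup = []
--
--     #find all groups of iden on the board
--     groups = get_groups(board,iden)
--
--     #for all groups
--     for item in groups:
--         #check if the group has any freedoms
--         if item[1] != []:
--             continue
--         #group has no freedoms.
--         deadGroup.extend(item[0])
--
--     return deadGroup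
-- ===== SOURCE B (Python) =====
-- from collections import deque
--
-- def identify_dead(board, iden):
--     # One-pass iterative scan with an explicit FIFO BFS per unvisited stone of
--     # color iden; a global visited set of (i,j) tuples replaces the recursive
--     # round-expansion and freedom-list bookkeeping of the original.
--     dead = []
--     visited = set()
--     for i in range(5):
--         for j in range(5):
--             if board[i][j] != iden or (i, j) in visited:
--                 continue
--             visited.add((i, j))
--             queue = deque([(i, j)])
--             members = [[i, j]]
--             has_liberty = False
--             while queue:
--                 ci, cj = queue.popleft()
--                 for ni, nj in ((ci - 1, cj), (ci, cj + 1), (ci + 1, cj), (ci, cj - 1)):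
--                     if ni < 0 or ni > 4 or nj < 0 or nj > 4:
--                         continue
--                     cell = board[ni][nj]
--                     if cell == 0:
--                         has_liberty = True
--                     if cell == iden and (ni, nj) not in visited:
--                         visited.add((ni, nj))
--                         queue.append((ni, nj))
--                         members.append([ni, nj])
--             if not has_liberty:
--                 dead.extend(members)
--     return dead
-- ===== Notes on version B (the rewrite author's own statement) =====
-- stated objective: simpler
-- what changed: Replaces the recursive round-based group expansion (which rescans the whole group every round with quadratic list-membership tests and builds an explicit freedom list) by a single scan with an explicit FIFO deque BFS per group, a global visited set of tuples and a boolean liberty flag.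
import Mathlib
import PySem

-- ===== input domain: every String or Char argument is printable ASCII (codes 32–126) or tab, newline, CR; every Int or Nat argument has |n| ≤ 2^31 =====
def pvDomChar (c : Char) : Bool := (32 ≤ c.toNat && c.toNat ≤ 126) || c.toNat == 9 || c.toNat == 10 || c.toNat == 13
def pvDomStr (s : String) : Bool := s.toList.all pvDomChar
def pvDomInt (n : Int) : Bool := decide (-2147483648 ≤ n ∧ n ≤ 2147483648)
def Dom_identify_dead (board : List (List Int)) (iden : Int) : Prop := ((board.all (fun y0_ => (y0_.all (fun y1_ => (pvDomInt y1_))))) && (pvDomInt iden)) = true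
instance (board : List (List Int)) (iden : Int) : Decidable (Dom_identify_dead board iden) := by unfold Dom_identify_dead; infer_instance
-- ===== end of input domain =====

-- B replaces the recursive round-based group expansion with a single scan plus
-- an explicit FIFO-queue BFS per group, a global visited set and a liberty flag
-- (objective: simpler).  Equivalence is about the return value only; A mutates
-- its internal lists in place but never a caller-visible argument.

-- board[i][j]; the IndexError case (board smaller than 5×5) is excluded by Pre_.
def pvCell (board : List (List Int)) (i j : Int) : Int :=
  ((PySem.List.pyGet? board i).bind (fun r => PySem.List.pyGet? r j)).getD 0

-- ===== PORT A =====
def pvAddList : List (List Int) := [[-1, 0], [0, 1], [1, 0], [0, -1]]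

-- member[k] for the 2-element coordinate lists A works with (always in range).
def pvGetI (l : List Int) (k : Int) : Int := (PySem.List.pyGet? l k).getD 0

-- body of the double loop 'for member in currentMembers: for index in addList';
-- the per-neighbour body is the named helper pvNStep.
def pvNStep (board : List (List Int)) (iden : Int) (currentMembers : List (List Int))
    (member : List Int) (st : List (List Int) × List (List Int)) (index : List Int) :
    List (List Int) × List (List Int) :=
  let tp : List Int := [pvGetI member 0 + pvGetI index 0, pvGetI member 1 + pvGetI index 1]
  if pvGetI tp 0 < 0 ∨ pvGetI tp 0 > 4 ∨ pvGetI tp 1 < 0 ∨ pvGetI tp 1 > 4 then st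
  else
    let st1 := if pvCell board (pvGetI tp 0) (pvGetI tp 1) = 0 ∧ tp ∉ st.2
      then (st.1, st.2 ++ [tp]) else st
    if pvCell board (pvGetI tp 0) (pvGetI tp 1) = iden ∧ tp ∉ st1.1 ∧ tp ∉ currentMembers
      then (st1.1 ++ [tp], st1.2) else st1

def pvCheckStep (board : List (List Int)) (iden : Int) (currentMembers : List (List Int))
    (st : List (List Int) × List (List Int)) (member : List Int) :
    List (List Int) × List (List Int) :=
  pvAddList.foldl (pvNStep board iden currentMembers member) st

-- check_group; the extra fuel argument only makes the recursion structural: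
-- on the 5×5 boards admitted by Pre_ the group has ≤ 25 stones, each recursive
-- call adds at least one, so fuel 26 is never exhausted (proved below).
def pvCheckGroup (board : List (List Int)) (currentMembers freedomGroup : List (List Int))
    (iden : Int) : Nat → List (List Int) × List (List Int)
  | 0 => (currentMembers, freedomGroup)
  | fuel + 1 =>
    let st := currentMembers.foldl (pvCheckStep board iden currentMembers) ([], freedomGroup)
    if st.1 = [] then (currentMembers, st.2)
    else pvCheckGroup board (currentMembers ++ st.1) st.2 iden fuel

def pvGetGroups (board : List (List Int)) (iden : Int) :
    List ((List (List Int)) × (List (List Int))) :=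
  ((PySem.List.pyRange 0 5 1).foldl (fun st i =>
    (PySem.List.pyRange 0 5 1).foldl (fun st j =>
      if pvCell board i j ≠ iden then st
      else if [i, j] ∈ st.2 then st
      else
        let answer := pvCheckGroup board [[i, j]] [] iden 26
        (st.1 ++ [answer], st.2 ++ answer.1)) st)
    (([], []) : List ((List (List Int)) × (List (List Int))) × List (List Int))).1

def identify_dead (board : List (List Int)) (iden : Int) : List (List Int) :=
  (pvGetGroups board iden).foldl
    (fun deadGroup item => if item.2 ≠ [] then deadGroup else deadGroup ++ item.1) []

-- ===== PORT B =====
def pvNbrs (ci cj : Int) : List (Int × Int) :=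
  [(ci - 1, cj), (ci, cj + 1), (ci + 1, cj), (ci, cj - 1)]

-- the 'while queue' loop; state (visited, queue, members, has_liberty).
-- Fuel 26 only makes the loop structural: each iteration pops one of at most
-- 25 ever-enqueued positions (proved below).
def pvBfs (board : List (List Int)) (iden : Int) :
    Nat → List (Int × Int) → PySem.Set (Int × Int) → List (List Int) → Bool →
    PySem.Set (Int × Int) × List (List Int) × Bool
  | _, [], visited, members, hasLib => (visited, members, hasLib)
  | 0, _ :: _, visited, members, hasLib => (visited, members, hasLib)
  | fuel + 1, c :: queue, visited, members, hasLib =>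
    let st := (pvNbrs c.1 c.2).foldl (fun st n =>
      if n.1 < 0 ∨ n.1 > 4 ∨ n.2 < 0 ∨ n.2 > 4 then st
      else
        let cell := pvCell board n.1 n.2
        let st1 := if cell = 0 then (st.1, st.2.1, st.2.2.1, true) else st
        if cell = iden ∧ ¬ PySem.Set.contains st1.1 n then
          (PySem.Set.add st1.1 n, st1.2.1 ++ [n], st1.2.2.1 ++ [[n.1, n.2]], st1.2.2.2)
        else st1) (visited, queue, members, hasLib)
    pvBfs board iden fuel st.2.1 st.1 st.2.2.1 st.2.2.2

def identify_dead_alt (board : List (List Int)) (iden : Int) : List (List Int) :=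
  ((PySem.List.pyRange 0 5 1).foldl (fun st i =>
    (PySem.List.pyRange 0 5 1).foldl (fun st j =>
      if pvCell board i j ≠ iden ∨ PySem.Set.contains st.1 (i, j) then st
      else
        let r := pvBfs board iden 26 [(i, j)] (PySem.Set.add st.1 (i, j)) [[i, j]] false
        (r.1, if r.2.2 then st.2 else st.2 ++ r.2.1)) st)
    ((PySem.Set.empty, []) : PySem.Set (Int × Int) × List (List Int))).2

-- ===== PRECONDITION & SPEC =====
-- A unconditionally reads board[i][j] for all 0 ≤ i,j ≤ 4 and raises IndexError
-- otherwise; Pre_ admits exactly the boards with a full 5×5 prefix.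
def Pre_identify_dead (board : List (List Int)) (iden : Int) : Prop :=
  5 ≤ board.length ∧ ∀ r ∈ board.take 5, 5 ≤ r.length

instance (board : List (List Int)) (iden : Int) : Decidable (Pre_identify_dead board iden) := by
  unfold Pre_identify_dead; infer_instance

def pvWitness_identify_dead : List (List Int) × Int :=
  ([[1, 2, 0, 0, 0], [2, 0, 0, 0, 0], [0, 0, 0, 0, 0], [0, 0, 0, 1, 2], [0, 0, 0, 2, 1]], 1)

def Spec_identify_dead (board : List (List Int)) (iden : Int) (out : List (List Int)) : Prop :=
  out = identify_dead_alt board iden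
instance (board : List (List Int)) (iden : Int) (out : List (List Int)) :
    Decidable (Spec_identify_dead board iden out) := by unfold Spec_identify_dead; infer_instance

-- ===== CLAIM (what is proved, stated in full; the proofs are below) =====
def Claim_equal_identify_dead : Prop := ∀ (board : List (List Int)) (iden : Int),
  Dom_identify_dead board iden → Pre_identify_dead board iden →
  Spec_identify_dead board iden (identify_dead board iden)

-- ===== LEMMAS AND PROOFS =====

-- ---------- abstract layer: both ports are bridged to machines over (Int × Int) ----------

def pvInb (p : Int × Int) : Bool := decide (0 ≤ p.1 ∧ p.1 ≤ 4 ∧ 0 ≤ p.2 ∧ p.2 ≤ 4)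

def pvGN (p : Int × Int) : List (Int × Int) := pvNbrs p.1 p.2

def pvOk (bd : List (List Int)) (c : Int) (p : Int × Int) : Bool :=
  pvInb p && (pvCell bd p.1 p.2 == c)

def pvLib (bd : List (List Int)) (p : Int × Int) : Bool :=
  (pvGN p).any (fun t => pvInb t && (pvCell bd t.1 t.2 == 0))

-- sequential discovery of the fresh same-colour neighbours of x against visited v
def pvNewAux (bd : List (List Int)) (c : Int) (v : List (Int × Int))
    (acc : List (Int × Int)) (ns : List (Int × Int)) : List (Int × Int) :=
  ns.foldl (fun acc t =>
    if pvOk bd c t = true ∧ t ∉ v ++ acc then acc ++ [t] else acc) acc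

def pvNew (bd : List (List Int)) (c : Int) (v : List (Int × Int)) (x : Int × Int) :
    List (Int × Int) := pvNewAux bd c v [] (pvGN x)

-- one round over frontier f: final visited and the newly discovered points
def pvTT (bd : List (List Int)) (c : Int) (v f : List (Int × Int)) :
    List (Int × Int) × List (Int × Int) :=
  f.foldl (fun s x => (s.1 ++ pvNew bd c s.1 x, s.2 ++ pvNew bd c s.1 x)) (v, [])

-- frontier-based rounds
def pvRF (bd : List (List Int)) (c : Int) : Nat → List (Int × Int) → List (Int × Int) → List (Int × Int)
  | 0, m, _ => m
  | fuel + 1, m, f =>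
    if (pvTT bd c m f).2 = [] then m else pvRF bd c fuel (m ++ (pvTT bd c m f).2) (pvTT bd c m f).2

-- A's rounds: rescan ALL members each round
def pvRA (bd : List (List Int)) (c : Int) : Nat → List (Int × Int) → List (Int × Int)
  | 0, m => m
  | fuel + 1, m =>
    if (pvTT bd c m m).2 = [] then m else pvRA bd c fuel (m ++ (pvTT bd c m m).2)

-- B's FIFO machine
def pvQQ (bd : List (List Int)) (c : Int) : Nat → List (Int × Int) → List (Int × Int) → Bool → List (Int × Int) × Bool
  | _, [], v, hl => (v, hl)
  | 0, _ :: _, v, hl => (v, hl)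
  | fuel + 1, x :: q, v, hl =>
    pvQQ bd c fuel (q ++ pvNew bd c v x) (v ++ pvNew bd c v x) (hl || pvLib bd x)

def pvEnc (p : Int × Int) : List Int := [p.1, p.2]

def pvGrid : List (Int × Int) :=
  (List.range 5).flatMap (fun i => (List.range 5).map (fun j => ((i : Int), (j : Int))))

def pvClosed (bd : List (List Int)) (c : Int) (w : List (Int × Int)) : Prop :=
  ∀ p ∈ w, ∀ t ∈ pvGN p, pvOk bd c t = true → t ∈ w

-- ---------- pvNew ----------

theorem pvNewAux_mem (bd : List (List Int)) (c : Int) (v : List (Int × Int)) :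
    ∀ ns acc t, t ∈ pvNewAux bd c v acc ns →
      t ∈ acc ∨ (t ∈ ns ∧ pvOk bd c t = true ∧ t ∉ v) := by
  intro ns
  induction ns with
  | nil => intro acc t h; exact Or.inl h
  | cons x ns ih =>
    intro acc t h
    rw [show pvNewAux bd c v acc (x :: ns) =
      pvNewAux bd c v (if pvOk bd c x = true ∧ x ∉ v ++ acc then acc ++ [x] else acc) ns from rfl] at h
    rcases ih _ t h with h1 | h1
    · split at h1
      · rename_i hc
        rcases List.mem_append.1 h1 with h2 | h2
        · exact Or.inl h2
        · simp at h2; subst h2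
          exact Or.inr ⟨List.mem_cons_self, hc.1, fun hv => hc.2 (List.mem_append.2 (Or.inl hv))⟩
      · exact Or.inl h1
    · exact Or.inr ⟨List.mem_cons_of_mem _ h1.1, h1.2⟩

theorem pvNewAux_nodup (bd : List (List Int)) (c : Int) (v : List (Int × Int)) :
    ∀ ns acc, (v ++ acc).Nodup → (v ++ pvNewAux bd c v acc ns).Nodup := by
  intro ns
  induction ns with
  | nil => intro acc h; exact h
  | cons x ns ih =>
    intro acc h
    rw [show pvNewAux bd c v acc (x :: ns) =
      pvNewAux bd c v (if pvOk bd c x = true ∧ x ∉ v ++ acc then acc ++ [x] else acc) ns from rfl]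
    apply ih
    split
    · rename_i hc
      rw [show v ++ (acc ++ [x]) = (v ++ acc) ++ [x] from (List.append_assoc v acc [x]).symm]
      exact List.Nodup.append h (List.nodup_singleton x)
        (by intro y hy hz; simp at hz; subst hz; exact hc.2 hy)
    · exact h

theorem pvNewAux_sub (bd : List (List Int)) (c : Int) (v : List (Int × Int)) :
    ∀ ns acc, acc ⊆ pvNewAux bd c v acc ns := by
  intro ns
  induction ns with
  | nil => intro acc; exact fun _ h => h
  | cons x ns ih =>
    intro acc
    rw [show pvNewAux bd c v acc (x :: ns) =
      pvNewAux bd c v (if pvOk bd c x = true ∧ x ∉ v ++ acc then acc ++ [x] else acc) ns from rfl]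
    split
    · exact List.Subset.trans (List.subset_append_left _ _) (ih _)
    · exact ih _

theorem pvNewAux_closes (bd : List (List Int)) (c : Int) (v : List (Int × Int)) :
    ∀ ns acc t, t ∈ ns → pvOk bd c t = true → t ∈ v ++ pvNewAux bd c v acc ns := by
  intro ns
  induction ns with
  | nil => intro acc t h; simp at h
  | cons x ns ih =>
    intro acc t ht hok
    rw [show pvNewAux bd c v acc (x :: ns) =
      pvNewAux bd c v (if pvOk bd c x = true ∧ x ∉ v ++ acc then acc ++ [x] else acc) ns from rfl]
    rcases List.mem_cons.1 ht with h | h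
    · subst h
      by_cases hm : t ∈ v ++ acc
      · rcases List.mem_append.1 hm with h2 | h2
        · exact List.mem_append.2 (Or.inl h2)
        · refine List.mem_append.2 (Or.inr ?_)
          have : acc ⊆ pvNewAux bd c v (if pvOk bd c t = true ∧ t ∉ v ++ acc then acc ++ [t] else acc) ns := by
            split
            · exact List.Subset.trans (List.subset_append_left _ _) (pvNewAux_sub bd c v ns _)
            · exact pvNewAux_sub bd c v ns _
          exact this h2
      · rw [if_pos ⟨hok, hm⟩]
        refine List.mem_append.2 (Or.inr ?_)
        exact pvNewAux_sub bd c v ns _ (by simp)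
    · exact ih _ t h hok

theorem pvNewAux_nil (bd : List (List Int)) (c : Int) (v : List (Int × Int)) :
    ∀ ns acc, (∀ t ∈ ns, pvOk bd c t = true → t ∈ v) → pvNewAux bd c v acc ns = acc := by
  intro ns
  induction ns with
  | nil => intro acc _; rfl
  | cons x ns ih =>
    intro acc h
    rw [show pvNewAux bd c v acc (x :: ns) =
      pvNewAux bd c v (if pvOk bd c x = true ∧ x ∉ v ++ acc then acc ++ [x] else acc) ns from rfl]
    rw [if_neg, ih _ (fun t ht => h t (List.mem_cons_of_mem _ ht))]
    rintro ⟨hok, hm⟩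
    exact hm (List.mem_append.2 (Or.inl (h x List.mem_cons_self hok)))

-- ---------- pvTT ----------

theorem pvTT_shift (bd : List (List Int)) (c : Int) :
    ∀ (f : List (Int × Int)) v n0,
      f.foldl (fun s x => (s.1 ++ pvNew bd c s.1 x, s.2 ++ pvNew bd c s.1 x)) (v, n0) =
        ((pvTT bd c v f).1, n0 ++ (pvTT bd c v f).2) := by
  intro f
  induction f with
  | nil => intro v n0; simp [pvTT]
  | cons x f ih =>
    intro v n0
    rw [show (x :: f).foldl (fun s y => (s.1 ++ pvNew bd c s.1 y, s.2 ++ pvNew bd c s.1 y)) (v, n0) =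
      f.foldl (fun s y => (s.1 ++ pvNew bd c s.1 y, s.2 ++ pvNew bd c s.1 y))
        (v ++ pvNew bd c v x, n0 ++ pvNew bd c v x) from rfl]
    rw [ih, show pvTT bd c v (x :: f) =
      f.foldl (fun s y => (s.1 ++ pvNew bd c s.1 y, s.2 ++ pvNew bd c s.1 y))
        (v ++ pvNew bd c v x, [] ++ pvNew bd c v x) from rfl, ih]
    simp [pvTT]

theorem pvTT_cons (bd : List (List Int)) (c : Int) (v : List (Int × Int)) (x : Int × Int)
    (f : List (Int × Int)) :
    pvTT bd c v (x :: f) =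
      ((pvTT bd c (v ++ pvNew bd c v x) f).1,
        pvNew bd c v x ++ (pvTT bd c (v ++ pvNew bd c v x) f).2) := by
  rw [show pvTT bd c v (x :: f) =
    f.foldl (fun s y => (s.1 ++ pvNew bd c s.1 y, s.2 ++ pvNew bd c s.1 y))
      (v ++ pvNew bd c v x, [] ++ pvNew bd c v x) from rfl, pvTT_shift]
  simp

theorem pvTT_fst (bd : List (List Int)) (c : Int) :
    ∀ (f : List (Int × Int)) v, (pvTT bd c v f).1 = v ++ (pvTT bd c v f).2 := by
  intro f
  induction f with
  | nil => intro v; simp [pvTT]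
  | cons x f ih =>
    intro v
    rw [pvTT_cons]
    simp only []
    rw [ih]
    simp

theorem pvTT_sub (bd : List (List Int)) (c : Int) :
    ∀ (f : List (Int × Int)) v t, t ∈ (pvTT bd c v f).2 → pvOk bd c t = true ∧ t ∉ v := by
  intro f
  induction f with
  | nil => intro v t h; simp [pvTT] at h
  | cons x f ih =>
    intro v t h
    rw [pvTT_cons] at h
    simp only [] at h
    rcases List.mem_append.1 h with h1 | h1
    · rcases pvNewAux_mem bd c v _ _ _ h1 with h2 | h2
      · simp at h2
      · exact ⟨h2.2.1, h2.2.2⟩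
    · have := ih _ t h1
      exact ⟨this.1, fun hv => this.2 (List.mem_append.2 (Or.inl hv))⟩

theorem pvTT_nodup (bd : List (List Int)) (c : Int) :
    ∀ (f : List (Int × Int)) v, v.Nodup → (pvTT bd c v f).1.Nodup := by
  intro f
  induction f with
  | nil => intro v h; simpa [pvTT] using h
  | cons x f ih =>
    intro v h
    rw [pvTT_cons]
    exact ih _ (by simpa using pvNewAux_nodup bd c v (pvGN x) [] (by simpa using h))

theorem pvTT_closed (bd : List (List Int)) (c : Int) :
    ∀ (f : List (Int × Int)) v x, x ∈ f → ∀ t ∈ pvGN x, pvOk bd c t = true →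
      t ∈ (pvTT bd c v f).1 := by
  intro f
  induction f with
  | nil => intro v x h; simp at h
  | cons y f ih =>
    intro v x hx t ht hok
    rw [pvTT_cons]
    simp only []
    rcases List.mem_cons.1 hx with h | h
    · subst h
      have h1 : t ∈ v ++ pvNew bd c v x := pvNewAux_closes bd c v (pvGN x) [] t ht hok
      rw [pvTT_fst]
      rcases List.mem_append.1 h1 with h2 | h2
      · exact List.mem_append.2 (Or.inl (List.mem_append.2 (Or.inl h2)))
      · exact List.mem_append.2 (Or.inl (List.mem_append.2 (Or.inr h2)))
    · exact ih _ x h t ht hok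

theorem pvTT_skip (bd : List (List Int)) (c : Int) :
    ∀ (pre f : List (Int × Int)) v,
      (∀ x ∈ pre, ∀ t ∈ pvGN x, pvOk bd c t = true → t ∈ v) →
      pvTT bd c v (pre ++ f) = pvTT bd c v f := by
  intro pre
  induction pre with
  | nil => intro f v _; rfl
  | cons x pre ih =>
    intro f v h
    rw [List.cons_append, pvTT_cons]
    have hnil : pvNew bd c v x = [] :=
      pvNewAux_nil bd c v (pvGN x) [] (fun t ht hok => h x List.mem_cons_self t ht hok)
    rw [hnil]
    simp only [List.append_nil, List.nil_append]
    rw [ih f v (fun y hy => h y (List.mem_cons_of_mem _ hy))]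

-- ---------- grid bound ----------

theorem pvMem_grid (p : Int × Int) : pvInb p = true ↔ p ∈ pvGrid := by
  obtain ⟨a, b⟩ := p
  have hg : pvGrid = [(0,0),(0,1),(0,2),(0,3),(0,4),(1,0),(1,1),(1,2),(1,3),(1,4),
    (2,0),(2,1),(2,2),(2,3),(2,4),(3,0),(3,1),(3,2),(3,3),(3,4),
    (4,0),(4,1),(4,2),(4,3),(4,4)] := by decide
  rw [hg]
  simp only [pvInb, decide_eq_true_eq, List.mem_cons, List.not_mem_nil, or_false,
    Prod.mk.injEq]
  constructor
  · rintro ⟨h1, h2, h3, h4⟩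
    interval_cases a <;> interval_cases b <;> simp
  · intro h
    rcases h with h|h|h|h|h|h|h|h|h|h|h|h|h|h|h|h|h|h|h|h|h|h|h|h|h <;>
      (obtain ⟨h1, h2⟩ := h; subst h1; subst h2; norm_num)

theorem pvLen25 (l : List (Int × Int)) (h1 : l.Nodup) (h2 : ∀ p ∈ l, pvInb p = true) :
    l.length ≤ 25 := by
  have hsub : l ⊆ pvGrid := fun p hp => (pvMem_grid p).1 (h2 p hp)
  have := (h1.subperm hsub).length_le
  simpa using this

theorem pvOk_inb (bd : List (List Int)) (c : Int) (p : Int × Int) (h : pvOk bd c p = true) :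
    pvInb p = true := by
  simp only [pvOk, Bool.and_eq_true] at h
  exact h.1

-- ---------- FIFO machine vs rounds ----------

theorem pvQQ_nil (bd : List (List Int)) (c : Int) (fuel : Nat) (v : List (Int × Int)) (hl : Bool) :
    pvQQ bd c fuel [] v hl = (v, hl) := by
  cases fuel <;> rfl

theorem pvQQ_level (bd : List (List Int)) (c : Int) :
    ∀ (f rest v : List (Int × Int)) (hl : Bool) (fuel : Nat),
      pvQQ bd c (fuel + f.length) (f ++ rest) v hl =
        pvQQ bd c fuel (rest ++ (pvTT bd c v f).2) (pvTT bd c v f).1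
          (hl || f.any (pvLib bd)) := by
  intro f
  induction f with
  | nil =>
    intro rest v hl fuel
    simp [pvTT]
  | cons x f ih =>
    intro rest v hl fuel
    have h1 : fuel + (x :: f).length = (fuel + f.length) + 1 := by simp; omega
    rw [h1, List.cons_append,
      show pvQQ bd c ((fuel + f.length) + 1) (x :: (f ++ rest)) v hl =
        pvQQ bd c (fuel + f.length) ((f ++ rest) ++ pvNew bd c v x)
          (v ++ pvNew bd c v x) (hl || pvLib bd x) from rfl,
      List.append_assoc, ih, pvTT_cons]
    simp only [List.any_cons]
    rw [← List.append_assoc]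
    congr 1
    rw [Bool.or_assoc]

theorem pvQQ_eq_RF (bd : List (List Int)) (c : Int) :
    ∀ (fuelR fuelQ : Nat) (m f : List (Int × Int)) (hl : Bool),
      m.Nodup → (∀ p ∈ m, pvInb p = true) →
      26 - m.length ≤ fuelR → f.length + (26 - m.length) ≤ fuelQ →
      (pvQQ bd c fuelQ f m hl).1 = pvRF bd c fuelR m f := by
  intro fuelR
  induction fuelR with
  | zero =>
    intro fuelQ m f hl hnd hinb hR hQ
    have := pvLen25 m hnd hinb
    omega
  | succ fR ih =>
    intro fuelQ m f hl hnd hinb hR hQ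
    have hlen : m.length ≤ 25 := pvLen25 m hnd hinb
    have hfq : f.length ≤ fuelQ := by omega
    have h0 : pvQQ bd c fuelQ f m hl = pvQQ bd c ((fuelQ - f.length) + f.length) (f ++ []) m hl := by
      rw [List.append_nil]; congr 1; omega
    rw [h0, pvQQ_level, List.nil_append, pvTT_fst]
    by_cases hn : (pvTT bd c m f).2 = []
    · rw [hn, pvQQ_nil]
      show m ++ [] = pvRF bd c (fR + 1) m f
      rw [show pvRF bd c (fR + 1) m f = if (pvTT bd c m f).2 = [] then m
        else pvRF bd c fR (m ++ (pvTT bd c m f).2) (pvTT bd c m f).2 from rfl, if_pos hn]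
      simp
    · have hne : (pvTT bd c m f).2.length ≥ 1 := by
        cases h : (pvTT bd c m f).2 with
        | nil => exact absurd h hn
        | cons a l => simp
      have hnd2 : (m ++ (pvTT bd c m f).2).Nodup := by
        rw [← pvTT_fst]; exact pvTT_nodup bd c f m hnd
      have hinb2 : ∀ p ∈ m ++ (pvTT bd c m f).2, pvInb p = true := by
        intro p hp
        rcases List.mem_append.1 hp with h | h
        · exact hinb p h
        · exact pvOk_inb bd c p (pvTT_sub bd c f m p h).1
      have hlen2 : (m ++ (pvTT bd c m f).2).length ≤ 25 := pvLen25 _ hnd2 hinb2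
      rw [show pvRF bd c (fR + 1) m f = if (pvTT bd c m f).2 = [] then m
        else pvRF bd c fR (m ++ (pvTT bd c m f).2) (pvTT bd c m f).2 from rfl, if_neg hn]
      apply ih
      · exact hnd2
      · exact hinb2
      · simp at hlen2 ⊢; omega
      · simp at hlen2 ⊢; omega

theorem pvQQ_hl (bd : List (List Int)) (c : Int) :
    ∀ (fuel : Nat) (q v done : List (Int × Int)) (hl0 : Bool),
      v = done ++ q → v.Nodup → (∀ p ∈ v, pvInb p = true) →
      q.length + (26 - v.length) ≤ fuel →
      (pvQQ bd c fuel q v (hl0 || done.any (pvLib bd))).2 =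
        (hl0 || ((pvQQ bd c fuel q v (hl0 || done.any (pvLib bd))).1.any (pvLib bd))) := by
  intro fuel
  induction fuel with
  | zero =>
    intro q v done hl0 hv hnd hinb hfuel
    have := pvLen25 v hnd hinb
    omega
  | succ fuel ih =>
    intro q v done hl0 hv hnd hinb hfuel
    cases q with
    | nil =>
      rw [pvQQ_nil]
      simp [hv]
    | cons x q' =>
      rw [show pvQQ bd c (fuel + 1) (x :: q') v (hl0 || done.any (pvLib bd)) =
        pvQQ bd c fuel (q' ++ pvNew bd c v x) (v ++ pvNew bd c v x)
          ((hl0 || done.any (pvLib bd)) || pvLib bd x) from rfl]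
      have hh : ((hl0 || done.any (pvLib bd)) || pvLib bd x) =
          (hl0 || (done ++ [x]).any (pvLib bd)) := by
        simp [List.any_append, Bool.or_assoc]
      rw [hh]
      have hvd : v ++ pvNew bd c v x = (done ++ [x]) ++ (q' ++ pvNew bd c v x) := by
        rw [hv]; simp
      have hnd2 : (v ++ pvNew bd c v x).Nodup := by
        simpa using pvNewAux_nodup bd c v (pvGN x) [] (by simpa using hnd)
      have hinb2 : ∀ p ∈ v ++ pvNew bd c v x, pvInb p = true := by
        intro p hp
        rcases List.mem_append.1 hp with h | h
        · exact hinb p h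
        · rcases pvNewAux_mem bd c v _ _ _ h with h1 | h1
          · simp at h1
          · exact pvOk_inb bd c p h1.2.1
      have hlen2 : (v ++ pvNew bd c v x).length ≤ 25 := pvLen25 _ hnd2 hinb2
      apply ih _ _ _ hl0 hvd hnd2 hinb2
      simp at hfuel hlen2 ⊢
      omega

theorem pvGN_symm (x t : Int × Int) (h : t ∈ pvGN x) : x ∈ pvGN t := by
  obtain ⟨a, b⟩ := x
  obtain ⟨u, w⟩ := t
  simp only [pvGN, pvNbrs, List.mem_cons, List.not_mem_nil, or_false, Prod.mk.injEq] at h ⊢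
  omega

theorem pvQQ_inv (bd : List (List Int)) (c : Int) (w : List (Int × Int))
    (hw : pvClosed bd c w) :
    ∀ (fuel : Nat) (q v : List (Int × Int)) (hl : Bool),
      (∀ x ∈ v, pvOk bd c x = true ∧ x ∉ w) → (∀ x ∈ q, x ∈ v) →
      ∀ y ∈ (pvQQ bd c fuel q v hl).1, pvOk bd c y = true ∧ y ∉ w := by
  intro fuel
  induction fuel with
  | zero =>
    intro q v hl hv hq y hy
    cases q with
    | nil => exact hv y hy
    | cons a l => exact hv y hy
  | succ fuel ih =>
    intro q v hl hv hq y hy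
    cases q with
    | nil => exact hv y hy
    | cons x q' =>
      rw [show pvQQ bd c (fuel + 1) (x :: q') v hl =
        pvQQ bd c fuel (q' ++ pvNew bd c v x) (v ++ pvNew bd c v x) (hl || pvLib bd x) from rfl] at hy
      refine ih _ _ _ ?_ ?_ y hy
      · intro z hz
        rcases List.mem_append.1 hz with h | h
        · exact hv z h
        · rcases pvNewAux_mem bd c v _ _ _ h with h1 | h1
          · simp at h1
          · refine ⟨h1.2.1, fun hzw => ?_⟩
            have hx : x ∈ pvGN z := pvGN_symm x z h1.1
            have : x ∈ w := hw z hzw x hx (hv x (hq x List.mem_cons_self)).1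
            exact (hv x (hq x List.mem_cons_self)).2 this
      · intro z hz
        rcases List.mem_append.1 hz with h | h
        · exact List.mem_append.2 (Or.inl (hq z (List.mem_cons_of_mem _ h)))
        · exact List.mem_append.2 (Or.inr h)

-- ---------- A rounds ----------

theorem pvRA_ext (bd : List (List Int)) (c : Int) :
    ∀ (fuel : Nat) (m : List (Int × Int)), ∃ t, pvRA bd c fuel m = m ++ t := by
  intro fuel
  induction fuel with
  | zero => intro m; exact ⟨[], by simp [pvRA]⟩
  | succ fuel ih =>
    intro m
    rw [show pvRA bd c (fuel + 1) m = if (pvTT bd c m m).2 = [] then m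
      else pvRA bd c fuel (m ++ (pvTT bd c m m).2) from rfl]
    split
    · exact ⟨[], by simp⟩
    · obtain ⟨t, ht⟩ := ih (m ++ (pvTT bd c m m).2)
      exact ⟨(pvTT bd c m m).2 ++ t, by rw [ht, List.append_assoc]⟩

theorem pvRA_eq_RF (bd : List (List Int)) (c : Int) :
    ∀ (fuel : Nat) (m pre f : List (Int × Int)), m = pre ++ f →
      (∀ x ∈ pre, ∀ t ∈ pvGN x, pvOk bd c t = true → t ∈ m) →
      pvRA bd c fuel m = pvRF bd c fuel m f := by
  intro fuel
  induction fuel with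
  | zero => intro m pre f _ _; rfl
  | succ fuel ih =>
    intro m pre f hm hpre
    have htt : pvTT bd c m m = pvTT bd c m f := by
      have h1 : pvTT bd c m (pre ++ f) = pvTT bd c m f :=
        pvTT_skip bd c pre f m (fun x hx t ht hok => hpre x hx t ht hok)
      calc pvTT bd c m m = pvTT bd c m (pre ++ f) := by rw [← hm]
        _ = pvTT bd c m f := h1
    rw [show pvRA bd c (fuel + 1) m = if (pvTT bd c m m).2 = [] then m
      else pvRA bd c fuel (m ++ (pvTT bd c m m).2) from rfl,
      show pvRF bd c (fuel + 1) m f = if (pvTT bd c m f).2 = [] then m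
      else pvRF bd c fuel (m ++ (pvTT bd c m f).2) (pvTT bd c m f).2 from rfl, htt]
    split
    · rfl
    · apply ih _ m _ rfl
      intro x hx t ht hok
      have h2 : t ∈ (pvTT bd c m f).1 := by
        rcases List.mem_append.1 (hm ▸ hx : x ∈ pre ++ f) with h | h
        · rw [pvTT_fst]
          exact List.mem_append.2 (Or.inl (hpre x h t ht hok))
        · exact pvTT_closed bd c f m x h t ht hok
      rwa [pvTT_fst] at h2

theorem pvRA_props (bd : List (List Int)) (c : Int) :
    ∀ (fuel : Nat) (m : List (Int × Int)), m.Nodup → (∀ p ∈ m, pvOk bd c p = true) →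
      26 - m.length ≤ fuel →
      (pvRA bd c fuel m).Nodup ∧ (∀ p ∈ pvRA bd c fuel m, pvOk bd c p = true) ∧
        (∀ x ∈ pvRA bd c fuel m, ∀ t ∈ pvGN x, pvOk bd c t = true → t ∈ pvRA bd c fuel m) := by
  intro fuel
  induction fuel with
  | zero =>
    intro m hnd hok hfuel
    have := pvLen25 m hnd (fun p hp => pvOk_inb bd c p (hok p hp))
    omega
  | succ fuel ih =>
    intro m hnd hok hfuel
    rw [show pvRA bd c (fuel + 1) m = if (pvTT bd c m m).2 = [] then m
      else pvRA bd c fuel (m ++ (pvTT bd c m m).2) from rfl]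
    split
    · rename_i hn
      refine ⟨hnd, hok, ?_⟩
      intro x hx t ht hokt
      have := pvTT_closed bd c m m x hx t ht hokt
      rwa [pvTT_fst, hn, List.append_nil] at this
    · rename_i hn
      have hnd2 : (m ++ (pvTT bd c m m).2).Nodup := by
        rw [← pvTT_fst]; exact pvTT_nodup bd c m m hnd
      have hok2 : ∀ p ∈ m ++ (pvTT bd c m m).2, pvOk bd c p = true := by
        intro p hp
        rcases List.mem_append.1 hp with h | h
        · exact hok p h
        · exact (pvTT_sub bd c m m p h).1
      have hlen2 := pvLen25 _ hnd2 (fun p hp => pvOk_inb bd c p (hok2 p hp))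
      have hne : (pvTT bd c m m).2.length ≥ 1 := by
        cases h : (pvTT bd c m m).2 with
        | nil => exact absurd h hn
        | cons a l => simp
      apply ih _ hnd2 hok2
      simp at hlen2 ⊢
      omega

-- ---------- bridge: port A to pvRA ----------

theorem pvEnc_mem (p : Int × Int) (l : List (Int × Int)) :
    pvEnc p ∈ l.map pvEnc ↔ p ∈ l := by
  constructor
  · intro h
    obtain ⟨q, hq, he⟩ := List.mem_map.1 h
    obtain ⟨a, b⟩ := q; obtain ⟨a', b'⟩ := p
    simp [pvEnc] at he
    obtain ⟨h1, h2⟩ := he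
    subst h1; subst h2; exact hq
  · exact fun h => List.mem_map_of_mem h

theorem pvGetI_pair0 (a b : Int) : pvGetI [a, b] 0 = a := rfl
theorem pvGetI_pair1 (a b : Int) : pvGetI [a, b] 1 = b := rfl

theorem pvNStep_fst (bd : List (List Int)) (c : Int) (M N acc : List (Int × Int))
    (fg : List (List Int)) (x t : Int × Int) (idx : List Int)
    (ht : t = (x.1 + pvGetI idx 0, x.2 + pvGetI idx 1)) :
    (pvNStep bd c (M.map pvEnc) (pvEnc x) ((N ++ acc).map pvEnc, fg) idx).1 =
      (N ++ (if pvOk bd c t = true ∧ t ∉ (M ++ N) ++ acc then acc ++ [t] else acc)).map pvEnc := by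
  obtain ⟨a, b⟩ := t
  simp only [Prod.mk.injEq] at ht
  simp only [pvNStep, pvEnc, pvGetI_pair0, pvGetI_pair1, ← ht.1, ← ht.2]
  by_cases hb : (a < 0 ∨ a > 4 ∨ b < 0 ∨ b > 4)
  · rw [if_pos hb, if_neg (by
      rintro ⟨hok, -⟩
      have := pvOk_inb bd c (a, b) hok
      simp only [pvInb, decide_eq_true_eq] at this
      omega)]
  · rw [if_neg hb]
    have hinb : pvInb (a, b) = true := by
      simp only [pvInb, decide_eq_true_eq]; omega
    have hm : ∀ l : List (Int × Int), (([a, b] : List Int) ∈ l.map pvEnc) ↔ ((a, b) ∈ l) :=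
      fun l => pvEnc_mem (a, b) l
    by_cases hR : (pvOk bd c (a, b) = true ∧ (a, b) ∉ M ++ N ++ acc)
    · have hok := hR.1
      simp only [pvOk, Bool.and_eq_true, beq_iff_eq] at hok
      have hnm := hR.2
      simp only [List.mem_append] at hnm
      by_cases hc0 : (pvCell bd a b = 0 ∧ ([a, b] : List Int) ∉ fg)
      · rw [if_pos hc0]
        dsimp only
        rw [if_pos ⟨hok.2, by rw [hm]; simp [List.mem_append]; tauto,
          by rw [hm]; tauto⟩, if_pos hR]
        simp [pvEnc]
      · rw [if_neg hc0]
        dsimp only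
        rw [if_pos ⟨hok.2, by rw [hm]; simp [List.mem_append]; tauto,
          by rw [hm]; tauto⟩, if_pos hR]
        simp [pvEnc]
    · have hng : ¬(pvCell bd a b = c ∧ ([a, b] : List Int) ∉ (N ++ acc).map pvEnc ∧
          ([a, b] : List Int) ∉ M.map pvEnc) := by
        rintro ⟨hcel, hn1, hn2⟩
        rw [hm] at hn1 hn2
        apply hR
        refine ⟨by simp [pvOk, hinb, hcel], ?_⟩
        simp only [List.mem_append] at hn1 ⊢
        tauto
      by_cases hc0 : (pvCell bd a b = 0 ∧ ([a, b] : List Int) ∉ fg)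
      · rw [if_pos hc0]
        dsimp only
        rw [if_neg (by simpa using hng), if_neg hR]
      · rw [if_neg hc0]
        dsimp only
        rw [if_neg (by simpa using hng), if_neg hR]

theorem pvNStep_snd (bd : List (List Int)) (c : Int) (cm S fg : List (List Int))
    (x t : Int × Int) (idx : List Int)
    (ht : t = (x.1 + pvGetI idx 0, x.2 + pvGetI idx 1)) :
    ((pvNStep bd c cm (pvEnc x) (S, fg) idx).2 = [] ↔
      fg = [] ∧ ¬(pvInb t = true ∧ pvCell bd t.1 t.2 = 0)) := by
  obtain ⟨a, b⟩ := t
  simp only [Prod.mk.injEq] at ht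
  simp only [pvNStep, pvEnc, pvGetI_pair0, pvGetI_pair1, ← ht.1, ← ht.2]
  by_cases hb : (a < 0 ∨ a > 4 ∨ b < 0 ∨ b > 4)
  · rw [if_pos hb]
    have : ¬(pvInb (a, b) = true ∧ pvCell bd a b = 0) := by
      rintro ⟨hi, -⟩
      simp only [pvInb, decide_eq_true_eq] at hi
      omega
    simp [this]
  · rw [if_neg hb]
    have hinb : pvInb (a, b) = true := by
      simp only [pvInb, decide_eq_true_eq]; omega
    by_cases hc0 : (pvCell bd a b = 0 ∧ ([a, b] : List Int) ∉ fg)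
    · rw [if_pos hc0]
      dsimp only
      have h2 : ∀ z : List (List Int) × List (List Int),
          (if pvCell bd a b = c ∧ ([a, b] : List Int) ∉ z.1 ∧ ([a, b] : List Int) ∉ cm
            then (z.1 ++ [[a, b]], z.2) else z).2 = z.2 := by
        intro z; split <;> rfl
      rw [h2 (S, fg ++ [[a, b]])]
      simp [hinb, hc0.1]
    · rw [if_neg hc0]
      dsimp only
      have h2 : ∀ z : List (List Int) × List (List Int),
          (if pvCell bd a b = c ∧ ([a, b] : List Int) ∉ z.1 ∧ ([a, b] : List Int) ∉ cm
            then (z.1 ++ [[a, b]], z.2) else z).2 = z.2 := by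
        intro z; split <;> rfl
      rw [h2 (S, fg)]
      rw [not_and_or, not_not] at hc0
      by_cases hz : pvCell bd a b = 0
      · have hmem : ([a, b] : List Int) ∈ fg := by tauto
        have hne : fg ≠ [] := by rintro rfl; simp at hmem
        simp [hne, hinb, hz]
      · simp [hinb, hz]

theorem pvSMaux (bd : List (List Int)) (c : Int) (M N : List (Int × Int)) (x : Int × Int) :
    ∀ (offs : List (List Int)) (ns : List (Int × Int)),
      List.Forall₂ (fun idx t => t = (x.1 + pvGetI idx 0, x.2 + pvGetI idx 1)) offs ns →
      ∀ (acc : List (Int × Int)) (fg : List (List Int)),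
      ∃ FG, offs.foldl (pvNStep bd c (M.map pvEnc) (pvEnc x)) ((N ++ acc).map pvEnc, fg) =
          ((N ++ pvNewAux bd c (M ++ N) acc ns).map pvEnc, FG) ∧
        (FG = [] ↔ fg = [] ∧ ∀ t ∈ ns, ¬(pvInb t = true ∧ pvCell bd t.1 t.2 = 0)) := by
  intro offs ns h
  induction h with
  | nil =>
    intro acc fg
    refine ⟨fg, ?_, by simp⟩
    rfl
  | @cons idx t offs ns hrel hrest ih =>
    intro acc fg
    have hfst := pvNStep_fst bd c M N acc fg x t idx hrel
    have hsnd := pvNStep_snd bd c (M.map pvEnc) ((N ++ acc).map pvEnc) fg x t idx hrel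
    set st1 := pvNStep bd c (M.map pvEnc) (pvEnc x) ((N ++ acc).map pvEnc, fg) idx with hst1
    have hpair : st1 = ((N ++ (if pvOk bd c t = true ∧ t ∉ (M ++ N) ++ acc
        then acc ++ [t] else acc)).map pvEnc, st1.2) := by
      rw [← hfst]
    obtain ⟨FG, hA, hB⟩ := ih (if pvOk bd c t = true ∧ t ∉ (M ++ N) ++ acc
        then acc ++ [t] else acc) st1.2
    refine ⟨FG, ?_, ?_⟩
    · rw [show (idx :: offs).foldl (pvNStep bd c (M.map pvEnc) (pvEnc x)) ((N ++ acc).map pvEnc, fg)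
        = offs.foldl (pvNStep bd c (M.map pvEnc) (pvEnc x)) st1 from rfl]
      rw [hpair, hA]
      rfl
    · rw [hB, hsnd]
      simp only [List.mem_cons]
      constructor
      · rintro ⟨⟨hfg, hnt⟩, hall⟩
        exact ⟨hfg, by rintro u (rfl | hu); exact hnt; exact hall u hu⟩
      · rintro ⟨hfg, hall⟩
        exact ⟨⟨hfg, hall t (Or.inl rfl)⟩, fun u hu => hall u (Or.inr hu)⟩

set_option maxHeartbeats 1000000 in
theorem pvSM (bd : List (List Int)) (c : Int) (M N : List (Int × Int))
    (fg : List (List Int)) (x : Int × Int) :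
    ∃ FG, pvCheckStep bd c (M.map pvEnc) (N.map pvEnc, fg) (pvEnc x) =
        ((N ++ pvNew bd c (M ++ N) x).map pvEnc, FG) ∧
      (FG = [] ↔ fg = [] ∧ pvLib bd x = false) := by
  have hgn : pvGN x = [(x.1 - 1, x.2), (x.1, x.2 + 1), (x.1 + 1, x.2), (x.1, x.2 - 1)] := rfl
  have hal : pvAddList = [[-1, 0], [0, 1], [1, 0], [0, -1]] := rfl
  have hrel : List.Forall₂ (fun idx t => t = (x.1 + pvGetI idx 0, x.2 + pvGetI idx 1))
      pvAddList (pvGN x) := by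
    rw [hgn, hal]
    refine List.Forall₂.cons ?_ (List.Forall₂.cons ?_ (List.Forall₂.cons ?_
      (List.Forall₂.cons ?_ List.Forall₂.nil))) <;>
      · rw [Prod.ext_iff]
        refine ⟨?_, ?_⟩ <;> simp [pvGetI_pair0, pvGetI_pair1] <;> ring
  obtain ⟨FG, hA, hB⟩ := pvSMaux bd c M N x pvAddList (pvGN x) hrel [] fg
  refine ⟨FG, ?_, ?_⟩
  · unfold pvCheckStep pvNew
    rw [List.append_nil] at hA
    exact hA
  · rw [hB]
    have : (pvLib bd x = false) ↔ ∀ t ∈ pvGN x, ¬(pvInb t = true ∧ pvCell bd t.1 t.2 = 0) := by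
      simp [pvLib, List.any_eq_false]
    rw [this]

theorem pvRound (bd : List (List Int)) (c : Int) (M : List (Int × Int)) :
    ∀ (f N : List (Int × Int)) (fg : List (List Int)),
      ∃ FG, (f.map pvEnc).foldl (pvCheckStep bd c (M.map pvEnc)) (N.map pvEnc, fg) =
          ((N ++ (pvTT bd c (M ++ N) f).2).map pvEnc, FG) ∧
        (FG = [] ↔ fg = [] ∧ ∀ x ∈ f, pvLib bd x = false) := by
  intro f
  induction f with
  | nil =>
    intro N fg
    refine ⟨fg, ?_, by simp⟩
    simp [pvTT]
  | cons x f ih =>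
    intro N fg
    obtain ⟨FG1, hA1, hB1⟩ := pvSM bd c M N fg x
    obtain ⟨FG, hA, hB⟩ := ih (N ++ pvNew bd c (M ++ N) x) FG1
    refine ⟨FG, ?_, ?_⟩
    · rw [show ((x :: f).map pvEnc).foldl (pvCheckStep bd c (M.map pvEnc)) (N.map pvEnc, fg)
        = (f.map pvEnc).foldl (pvCheckStep bd c (M.map pvEnc))
            (pvCheckStep bd c (M.map pvEnc) (N.map pvEnc, fg) (pvEnc x)) from rfl, hA1, hA,
        pvTT_cons]
      simp [List.append_assoc]
    · rw [hB, hB1]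
      simp only [List.mem_cons]
      constructor
      · rintro ⟨⟨hfg, hx⟩, hall⟩
        exact ⟨hfg, by rintro u (rfl | hu); exact hx; exact hall u hu⟩
      · rintro ⟨hfg, hall⟩
        exact ⟨⟨hfg, hall x (Or.inl rfl)⟩, fun u hu => hall u (Or.inr hu)⟩

theorem pvCG (bd : List (List Int)) (c : Int) :
    ∀ (fuel : Nat) (M : List (Int × Int)) (fg : List (List Int)),
      M.Nodup → (∀ p ∈ M, pvInb p = true) → 26 - M.length ≤ fuel →
      ∃ FG, pvCheckGroup bd (M.map pvEnc) fg c fuel = ((pvRA bd c fuel M).map pvEnc, FG) ∧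
        (FG = [] ↔ fg = [] ∧ ∀ x ∈ pvRA bd c fuel M, pvLib bd x = false) := by
  intro fuel
  induction fuel with
  | zero =>
    intro M fg hnd hinb hfuel
    have := pvLen25 M hnd hinb
    omega
  | succ fuel ih =>
    intro M fg hnd hinb hfuel
    obtain ⟨FG1, hA1, hB1⟩ := pvRound bd c M M [] fg
    rw [show ((([] : List (Int × Int)) ++ (pvTT bd c (M ++ []) M).2).map pvEnc)
      = ((pvTT bd c M M).2.map pvEnc) by simp] at hA1
    rw [show (([] : List (Int × Int)).map pvEnc) = ([] : List (List Int)) from rfl] at hA1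
    rw [show pvCheckGroup bd (M.map pvEnc) fg c (fuel + 1) =
      (if ((M.map pvEnc).foldl (pvCheckStep bd c (M.map pvEnc)) ([], fg)).1 = []
        then (M.map pvEnc, ((M.map pvEnc).foldl (pvCheckStep bd c (M.map pvEnc)) ([], fg)).2)
        else pvCheckGroup bd
          (M.map pvEnc ++ ((M.map pvEnc).foldl (pvCheckStep bd c (M.map pvEnc)) ([], fg)).1)
          ((M.map pvEnc).foldl (pvCheckStep bd c (M.map pvEnc)) ([], fg)).2 c fuel) from rfl,
      hA1]
    rw [show pvRA bd c (fuel + 1) M = (if (pvTT bd c M M).2 = [] then M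
      else pvRA bd c fuel (M ++ (pvTT bd c M M).2)) from rfl]
    by_cases hn : (pvTT bd c M M).2 = []
    · rw [if_pos hn, if_pos (by rw [hn]; rfl)]
      exact ⟨FG1, rfl, by rw [hB1]⟩
    · rw [if_neg (by simpa using hn), if_neg hn]
      have hnd2 : (M ++ (pvTT bd c M M).2).Nodup := by
        rw [← pvTT_fst]; exact pvTT_nodup bd c M M hnd
      have hinb2 : ∀ p ∈ M ++ (pvTT bd c M M).2, pvInb p = true := by
        intro p hp
        rcases List.mem_append.1 hp with h | h
        · exact hinb p h
        · exact pvOk_inb bd c p (pvTT_sub bd c M M p h).1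
      have hlen2 := pvLen25 _ hnd2 hinb2
      have hne : (pvTT bd c M M).2.length ≥ 1 := by
        cases h : (pvTT bd c M M).2 with
        | nil => exact absurd h hn
        | cons a l => simp
      obtain ⟨FG, hA, hB⟩ := ih (M ++ (pvTT bd c M M).2) FG1 hnd2 hinb2
        (by simp at hlen2 ⊢; omega)
      rw [List.map_append] at hA
      refine ⟨FG, hA, ?_⟩
      rw [hB, hB1]
      obtain ⟨tl, htl⟩ := pvRA_ext bd c fuel (M ++ (pvTT bd c M M).2)
      constructor
      · rintro ⟨⟨hfg, -⟩, hall⟩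
        exact ⟨hfg, hall⟩
      · rintro ⟨hfg, hall⟩
        refine ⟨⟨hfg, fun u hu => hall u ?_⟩, hall⟩
        rw [htl]
        exact List.mem_append.2 (Or.inl (List.mem_append.2 (Or.inl hu)))

-- ---------- bridge: port B to pvQQ ----------

theorem pvSet_mem_add (s : PySem.Set (Int × Int)) (x y : Int × Int) :
    y ∈ PySem.Set.add s x ↔ y ∈ s ∨ y = x := by
  simp [PySem.Set.mem_add]

theorem pvNQ (bd : List (List Int)) (c : Int) (w v : List (Int × Int)) (x : Int × Int)
    (hw : pvClosed bd c w) (hv : ∀ y ∈ v, pvOk bd c y = true ∧ y ∉ w) (hx : x ∈ v) :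
    ∀ (ns acc : List (Int × Int)) (S : PySem.Set (Int × Int)) (q0 : List (Int × Int)) (hl : Bool),
      (∀ u ∈ ns, u ∈ pvGN x) → (∀ y, y ∈ S ↔ y ∈ w ∨ y ∈ v ++ acc) →
      ∃ S1, ns.foldl (fun st n =>
          if n.1 < 0 ∨ n.1 > 4 ∨ n.2 < 0 ∨ n.2 > 4 then st
          else
            let cell := pvCell bd n.1 n.2
            let st1 := if cell = 0 then (st.1, st.2.1, st.2.2.1, true) else st
            if cell = c ∧ ¬ PySem.Set.contains st1.1 n then
              (PySem.Set.add st1.1 n, st1.2.1 ++ [n], st1.2.2.1 ++ [[n.1, n.2]], st1.2.2.2)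
            else st1)
          (S, q0 ++ acc, (v ++ acc).map pvEnc, hl) =
        (S1, q0 ++ pvNewAux bd c v acc ns, (v ++ pvNewAux bd c v acc ns).map pvEnc,
          hl || ns.any (fun t => pvInb t && (pvCell bd t.1 t.2 == 0))) ∧
        (∀ y, y ∈ S1 ↔ y ∈ w ∨ y ∈ v ++ pvNewAux bd c v acc ns) := by
  intro ns
  induction ns with
  | nil =>
    intro acc S q0 hl _ hS
    refine ⟨S, by simp [pvNewAux], fun y => by simpa [pvNewAux] using hS y⟩
  | cons t ns ih =>
    intro acc S q0 hl hns hS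
    rw [List.foldl_cons]
    have hstep : pvNewAux bd c v acc (t :: ns) =
        pvNewAux bd c v (if pvOk bd c t = true ∧ t ∉ v ++ acc then acc ++ [t] else acc) ns := rfl
    by_cases hbnd : (t.1 < 0 ∨ t.1 > 4 ∨ t.2 < 0 ∨ t.2 > 4)
    · have hinb : pvInb t = false := by
        simp only [pvInb, decide_eq_false_iff_not]; omega
      have hokf : ¬(pvOk bd c t = true ∧ t ∉ v ++ acc) := by
        rintro ⟨hok, -⟩
        rw [pvOk, hinb] at hok; simp at hok
      rw [if_pos hbnd, hstep, if_neg hokf]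
      have hany : ((t :: ns).any fun u => pvInb u && (pvCell bd u.1 u.2 == 0)) =
          (ns.any fun u => pvInb u && (pvCell bd u.1 u.2 == 0)) := by
        simp [hinb]
      rw [hany]
      exact ih acc S q0 hl (fun u hu => hns u (List.mem_cons_of_mem _ hu)) hS
    · have hinb : pvInb t = true := by
        simp only [pvInb, decide_eq_true_eq]; omega
      rw [if_neg hbnd]
      have htgn : t ∈ pvGN x := hns t List.mem_cons_self
      have hxok := (hv x hx).1
      have hnw : t ∉ w := fun htw =>
        (hv x hx).2 (hw t htw x (pvGN_symm x t htgn) hxok)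
      have hcontS : PySem.Set.contains S t = true ↔ (t ∈ v ++ acc) := by
        rw [show (PySem.Set.contains S t = true) ↔ t ∈ S by simp [PySem.Set.contains], hS t]
        constructor
        · rintro (h | h); exact absurd h hnw; exact h
        · exact Or.inr
      have hnsrest := fun u hu => hns u (List.mem_cons_of_mem _ hu)
      by_cases hz : pvCell bd t.1 t.2 = 0
      · dsimp only
        rw [if_pos hz]
        by_cases hadd : (pvOk bd c t = true ∧ t ∉ v ++ acc)
        · have hcell : pvCell bd t.1 t.2 = c := by
            have := hadd.1
            simp only [pvOk, hinb, Bool.true_and, beq_iff_eq] at this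
            exact this
          rw [if_pos ⟨hcell, by
            dsimp only
            intro hcc
            exact hadd.2 (hcontS.1 hcc)⟩]
          dsimp only
          rw [hstep, if_pos hadd]
          have heq1 : (q0 ++ acc) ++ [t] = q0 ++ (acc ++ [t]) := by simp
          have heq2 : ((v ++ acc).map pvEnc) ++ [[t.1, t.2]] = (v ++ (acc ++ [t])).map pvEnc := by
            simp [pvEnc]
          rw [heq1, heq2]
          obtain ⟨S1, hf, hS1⟩ := ih (acc ++ [t]) (PySem.Set.add S t) q0 true hnsrest (by
            intro y
            rw [pvSet_mem_add S t y, hS y]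
            simp only [List.mem_append, List.mem_singleton]
            tauto)
          refine ⟨S1, ?_, hS1⟩
          rw [hf]
          have hzb : (pvCell bd t.1 t.2 == 0) = true := by simpa using hz
          simp [hzb, hinb]
        · rw [if_neg (by
            rintro ⟨hcell, hnc⟩
            dsimp only at hnc
            have hok : pvOk bd c t = true := by simp [pvOk, hinb, hcell]
            have hmem : t ∈ v ++ acc := by
              by_contra hnm
              exact hadd ⟨hok, hnm⟩
            exact hnc (hcontS.2 hmem))]
          rw [hstep, if_neg hadd]
          obtain ⟨S1, hf, hS1⟩ := ih acc S q0 true hnsrest hS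
          refine ⟨S1, ?_, hS1⟩
          rw [hf]
          have hzb : (pvCell bd t.1 t.2 == 0) = true := by simpa using hz
          simp [hzb, hinb]
      · dsimp only
        rw [if_neg hz]
        by_cases hadd : (pvOk bd c t = true ∧ t ∉ v ++ acc)
        · have hcell : pvCell bd t.1 t.2 = c := by
            have := hadd.1
            simp only [pvOk, hinb, Bool.true_and, beq_iff_eq] at this
            exact this
          rw [if_pos ⟨hcell, by
            intro hcc
            exact hadd.2 (hcontS.1 hcc)⟩]
          rw [hstep, if_pos hadd]
          have heq1 : (q0 ++ acc) ++ [t] = q0 ++ (acc ++ [t]) := by simp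
          have heq2 : ((v ++ acc).map pvEnc) ++ [[t.1, t.2]] = (v ++ (acc ++ [t])).map pvEnc := by
            simp [pvEnc]
          rw [heq1, heq2]
          obtain ⟨S1, hf, hS1⟩ := ih (acc ++ [t]) (PySem.Set.add S t) q0 hl hnsrest (by
            intro y
            rw [pvSet_mem_add S t y, hS y]
            simp only [List.mem_append, List.mem_singleton]
            tauto)
          refine ⟨S1, ?_, hS1⟩
          rw [hf]
          have hzb : (pvCell bd t.1 t.2 == 0) = false := by simpa using hz
          simp [hzb, hinb]
        · rw [if_neg (by
            rintro ⟨hcell, hnc⟩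
            have hok : pvOk bd c t = true := by simp [pvOk, hinb, hcell]
            have hmem : t ∈ v ++ acc := by
              by_contra hnm
              exact hadd ⟨hok, hnm⟩
            exact hnc (hcontS.2 hmem))]
          rw [hstep, if_neg hadd]
          obtain ⟨S1, hf, hS1⟩ := ih acc S q0 hl hnsrest hS
          refine ⟨S1, ?_, hS1⟩
          rw [hf]
          have hzb : (pvCell bd t.1 t.2 == 0) = false := by simpa using hz
          simp [hzb, hinb]

theorem pvBfs_nil (bd : List (List Int)) (c : Int) (fuel : Nat)
    (S : PySem.Set (Int × Int)) (mem : List (List Int)) (hl : Bool) :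
    pvBfs bd c fuel [] S mem hl = (S, mem, hl) := by
  cases fuel <;> rfl

theorem pvBF (bd : List (List Int)) (c : Int) (w : List (Int × Int)) (hw : pvClosed bd c w) :
    ∀ (fuel : Nat) (q v : List (Int × Int)) (S : PySem.Set (Int × Int)) (hl : Bool),
      (∀ y, y ∈ S ↔ y ∈ w ∨ y ∈ v) → (∀ y ∈ v, pvOk bd c y = true ∧ y ∉ w) →
      (∀ y ∈ q, y ∈ v) →
      ∃ S1, pvBfs bd c fuel q S (v.map pvEnc) hl =
          (S1, (pvQQ bd c fuel q v hl).1.map pvEnc, (pvQQ bd c fuel q v hl).2) ∧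
        (∀ y, y ∈ S1 ↔ y ∈ w ∨ y ∈ (pvQQ bd c fuel q v hl).1) := by
  intro fuel
  induction fuel with
  | zero =>
    intro q v S hl hS hv hq
    cases q with
    | nil =>
      rw [pvBfs_nil, pvQQ_nil]
      exact ⟨S, rfl, hS⟩
    | cons a l =>
      exact ⟨S, rfl, hS⟩
  | succ fuel ih =>
    intro q v S hl hS hv hq
    cases q with
    | nil =>
      rw [pvBfs_nil, pvQQ_nil]
      exact ⟨S, rfl, hS⟩
    | cons x q' =>
      obtain ⟨S1, hfold, hS1⟩ := pvNQ bd c w v x hw hv (hq x List.mem_cons_self)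
        (pvNbrs x.1 x.2) [] S q' hl (fun u hu => hu) (by
          intro y
          rw [hS y]
          simp)
      simp only [List.append_nil] at hfold
      have hd : pvNewAux bd c v [] (pvNbrs x.1 x.2) = pvNew bd c v x := rfl
      have hlib : ((pvNbrs x.1 x.2).any fun u => pvInb u && (pvCell bd u.1 u.2 == 0)) =
          pvLib bd x := rfl
      rw [hd, hlib] at hfold
      have hstep : pvBfs bd c (fuel + 1) (x :: q') S (v.map pvEnc) hl =
          pvBfs bd c fuel (q' ++ pvNew bd c v x) S1 ((v ++ pvNew bd c v x).map pvEnc)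
            (hl || pvLib bd x) := by
        rw [show pvBfs bd c (fuel + 1) (x :: q') S (v.map pvEnc) hl =
          (pvBfs bd c fuel
            ((pvNbrs x.1 x.2).foldl _ (S, q', v.map pvEnc, hl)).2.1
            ((pvNbrs x.1 x.2).foldl _ (S, q', v.map pvEnc, hl)).1
            ((pvNbrs x.1 x.2).foldl _ (S, q', v.map pvEnc, hl)).2.2.1
            ((pvNbrs x.1 x.2).foldl _ (S, q', v.map pvEnc, hl)).2.2.2) from rfl, hfold]
      rw [hstep]
      have hv2 : ∀ y ∈ v ++ pvNew bd c v x, pvOk bd c y = true ∧ y ∉ w := by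
        intro y hy
        rcases List.mem_append.1 hy with h | h
        · exact hv y h
        · rcases pvNewAux_mem bd c v _ _ _ h with h1 | h1
          · simp at h1
          · refine ⟨h1.2.1, fun hyw => ?_⟩
            have hxgn : x ∈ pvGN y := pvGN_symm x y h1.1
            exact (hv x (hq x List.mem_cons_self)).2
              (hw y hyw x hxgn (hv x (hq x List.mem_cons_self)).1)
      have hq2 : ∀ y ∈ q' ++ pvNew bd c v x, y ∈ v ++ pvNew bd c v x := by
        intro y hy
        rcases List.mem_append.1 hy with h | h
        · exact List.mem_append.2 (Or.inl (hq y (List.mem_cons_of_mem _ h)))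
        · exact List.mem_append.2 (Or.inr h)
      obtain ⟨S2, hbfs, hS2⟩ := ih (q' ++ pvNew bd c v x) (v ++ pvNew bd c v x) S1
        (hl || pvLib bd x) hS1 hv2 hq2
      refine ⟨S2, ?_, ?_⟩
      · rw [hbfs]
        rfl
      · intro y
        rw [hS2 y]
        rfl

-- ---------- per-seed equivalence ----------

theorem pvSeed (bd : List (List Int)) (c : Int) (w : List (Int × Int)) (s : Int × Int)
    (S : PySem.Set (Int × Int))
    (hw : pvClosed bd c w) (hwok : ∀ p ∈ w, pvOk bd c p = true)
    (hS : ∀ y, y ∈ S ↔ y ∈ w)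
    (hs : pvOk bd c s = true) (hsw : s ∉ w) :
    ∃ C FG S1 hl,
      pvCheckGroup bd [pvEnc s] [] c 26 = (C.map pvEnc, FG) ∧
      pvBfs bd c 26 [s] (PySem.Set.add S s) [pvEnc s] false = (S1, C.map pvEnc, hl) ∧
      (FG = [] ↔ hl = false) ∧
      (∀ y, y ∈ S1 ↔ y ∈ w ∨ y ∈ C) ∧
      (∀ p ∈ C, pvOk bd c p = true) ∧ (∀ p ∈ C, p ∉ w) ∧
      pvClosed bd c (w ++ C) ∧ s ∈ C := by
  have hsinb : pvInb s = true := pvOk_inb bd c s hs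
  have hnd : ([s] : List (Int × Int)).Nodup := List.nodup_singleton s
  have hinb : ∀ p ∈ ([s] : List (Int × Int)), pvInb p = true := by
    intro p hp; rw [List.mem_singleton] at hp; subst hp; exact hsinb
  have hok1 : ∀ p ∈ ([s] : List (Int × Int)), pvOk bd c p = true := by
    intro p hp; rw [List.mem_singleton] at hp; subst hp; exact hs
  have hfa : (26 : Nat) - ([s] : List (Int × Int)).length ≤ 26 := by simp
  obtain ⟨FG, hcg, hFG⟩ := pvCG bd c 26 [s] [] hnd hinb hfa
  have hSmem : ∀ y, y ∈ PySem.Set.add S s ↔ y ∈ w ∨ y ∈ ([s] : List (Int × Int)) := by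
    intro y
    rw [pvSet_mem_add S s y, hS y, List.mem_singleton]
  have hv1 : ∀ y ∈ ([s] : List (Int × Int)), pvOk bd c y = true ∧ y ∉ w := by
    intro y hy; rw [List.mem_singleton] at hy; subst hy; exact ⟨hs, hsw⟩
  have hq1 : ∀ y ∈ ([s] : List (Int × Int)), y ∈ ([s] : List (Int × Int)) := fun y h => h
  obtain ⟨S1, hbfs, hS1⟩ := pvBF bd c w hw 26 [s] [s] (PySem.Set.add S s) false hSmem hv1 hq1
  have hQR : (pvQQ bd c 26 [s] [s] false).1 = pvRF bd c 26 [s] [s] :=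
    pvQQ_eq_RF bd c 26 26 [s] [s] false hnd hinb (by simp) (by simp)
  have hRA : pvRA bd c 26 [s] = pvRF bd c 26 [s] [s] :=
    pvRA_eq_RF bd c 26 [s] [] [s] rfl (by intro x hx; simp at hx)
  have hC : (pvQQ bd c 26 [s] [s] false).1 = pvRA bd c 26 [s] := by rw [hQR, hRA]
  have hhl := pvQQ_hl bd c 26 [s] [s] [] false rfl hnd hinb (by simp)
  simp only [List.any_nil, Bool.or_false, Bool.false_or] at hhl
  obtain ⟨hCnd, hCok, hCclosed⟩ := pvRA_props bd c 26 [s] hnd hok1 hfa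
  have hCinv := pvQQ_inv bd c w hw 26 [s] [s] false hv1 hq1
  refine ⟨pvRA bd c 26 [s], FG, S1, (pvQQ bd c 26 [s] [s] false).2, ?_, ?_, ?_, ?_, ?_, ?_, ?_, ?_⟩
  · exact hcg
  · rw [show ([pvEnc s] : List (List Int)) = List.map pvEnc [s] from rfl, hbfs, hC]
  · rw [hFG, hhl, hC]
    constructor
    · rintro ⟨-, hall⟩
      rw [List.any_eq_false]
      intro u hu
      rw [hall u hu]
      simp
    · intro hany
      rw [List.any_eq_false] at hany
      refine ⟨rfl, fun u hu => ?_⟩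
      have := hany u hu
      simpa using this
  · intro y
    rw [hS1 y, hC]
  · exact hCok
  · intro p hp
    rw [← hC] at hp
    exact (hCinv p hp).2
  · intro p hp u hu hou
    rcases List.mem_append.1 hp with h | h
    · exact List.mem_append.2 (Or.inl (hw p h u hu hou))
    · exact List.mem_append.2 (Or.inr (hCclosed p h u hu hou))
  · obtain ⟨tl, htl⟩ := pvRA_ext bd c 26 [s]
    rw [htl]
    exact List.mem_append.2 (Or.inl (List.mem_singleton.2 rfl))

-- ---------- outer loop ----------

def pvSeeds : List (Int × Int) :=
  ([0, 1, 2, 3, 4] : List Int).flatMap (fun i => ([0, 1, 2, 3, 4] : List Int).map (fun j => (i, j)))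

def pvStepA (bd : List (List Int)) (c : Int)
    (st : List ((List (List Int)) × (List (List Int))) × List (List Int)) (p : Int × Int) :
    List ((List (List Int)) × (List (List Int))) × List (List Int) :=
  if pvCell bd p.1 p.2 ≠ c then st
  else if [p.1, p.2] ∈ st.2 then st
  else
    let answer := pvCheckGroup bd [[p.1, p.2]] [] c 26
    (st.1 ++ [answer], st.2 ++ answer.1)

def pvStepB (bd : List (List Int)) (c : Int)
    (st : PySem.Set (Int × Int) × List (List Int)) (p : Int × Int) :
    PySem.Set (Int × Int) × List (List Int) :=
  if pvCell bd p.1 p.2 ≠ c ∨ PySem.Set.contains st.1 (p.1, p.2) then st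
  else
    let r := pvBfs bd c 26 [(p.1, p.2)] (PySem.Set.add st.1 (p.1, p.2)) [[p.1, p.2]] false
    (r.1, if r.2.2 then st.2 else st.2 ++ r.2.1)

def pvDeadOf (gl : List ((List (List Int)) × (List (List Int)))) : List (List Int) :=
  gl.foldl (fun d it => if it.2 ≠ [] then d else d ++ it.1) []

theorem pvA_as_seeds (bd : List (List Int)) (c : Int) :
    identify_dead bd c = pvDeadOf (pvSeeds.foldl (pvStepA bd c) ([], [])).1 := by
  have hr : PySem.List.pyRange 0 5 1 = [0, 1, 2, 3, 4] := by decide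
  unfold identify_dead pvGetGroups pvDeadOf
  rw [hr]
  conv_rhs => rw [pvSeeds, List.foldl_flatMap]
  simp only [List.foldl_map]
  rfl

theorem pvB_as_seeds (bd : List (List Int)) (c : Int) :
    identify_dead_alt bd c = (pvSeeds.foldl (pvStepB bd c) (PySem.Set.empty, [])).2 := by
  have hr : PySem.List.pyRange 0 5 1 = [0, 1, 2, 3, 4] := by decide
  unfold identify_dead_alt
  rw [hr]
  conv_rhs => rw [pvSeeds, List.foldl_flatMap]
  simp only [List.foldl_map]
  rfl

theorem pvOuter (bd : List (List Int)) (c : Int) :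
    ∀ (seeds : List (Int × Int)), (∀ p ∈ seeds, pvInb p = true) →
    ∀ (gl : List ((List (List Int)) × (List (List Int)))) (ac : List (List Int))
      (S : PySem.Set (Int × Int)) (dead : List (List Int)) (w : List (Int × Int)),
      ac = w.map pvEnc → (∀ y, y ∈ S ↔ y ∈ w) → pvClosed bd c w →
      (∀ p ∈ w, pvOk bd c p = true) → dead = pvDeadOf gl →
      ∃ w1, (seeds.foldl (pvStepA bd c) (gl, ac)).2 = w1.map pvEnc ∧
        (∀ y, y ∈ (seeds.foldl (pvStepB bd c) (S, dead)).1 ↔ y ∈ w1) ∧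
        pvClosed bd c w1 ∧ (∀ p ∈ w1, pvOk bd c p = true) ∧
        (seeds.foldl (pvStepB bd c) (S, dead)).2 =
          pvDeadOf (seeds.foldl (pvStepA bd c) (gl, ac)).1 := by
  intro seeds
  induction seeds with
  | nil =>
    intro _ gl ac S dead w hac hS hw hwok hdead
    simp only [List.foldl_nil]
    exact ⟨w, hac, fun y => hS y, hw, hwok, by rw [hdead]⟩
  | cons p seeds ih =>
    intro hseeds gl ac S dead w hac hS hw hwok hdead
    rw [List.foldl_cons, List.foldl_cons]
    have hpinb : pvInb p = true := hseeds p List.mem_cons_self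
    have hseeds' : ∀ q ∈ seeds, pvInb q = true :=
      fun q hq => hseeds q (List.mem_cons_of_mem _ hq)
    by_cases h1 : pvCell bd p.1 p.2 ≠ c
    · rw [show pvStepA bd c (gl, ac) p = (gl, ac) from by unfold pvStepA; rw [if_pos h1],
        show pvStepB bd c (S, dead) p = (S, dead) from by unfold pvStepB; rw [if_pos (Or.inl h1)]]
      exact ih hseeds' gl ac S dead w hac hS hw hwok hdead
    · have hcell : pvCell bd p.1 p.2 = c := by rwa [not_not] at h1
      by_cases h2 : p ∈ w
      · have hmemac : ([p.1, p.2] : List Int) ∈ ac := by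
          rw [hac, show ([p.1, p.2] : List Int) = pvEnc p from rfl, pvEnc_mem]
          exact h2
        have hcontB : PySem.Set.contains S (p.1, p.2) = true := by
          have : (p.1, p.2) ∈ S := by
            rw [show ((p.1, p.2) : Int × Int) = p from rfl, hS p]; exact h2
          simpa [PySem.Set.contains] using this
        rw [show pvStepA bd c (gl, ac) p = (gl, ac) from by
            unfold pvStepA; rw [if_neg h1, if_pos hmemac],
          show pvStepB bd c (S, dead) p = (S, dead) from by
            unfold pvStepB; rw [if_pos (Or.inr hcontB)]]
        exact ih hseeds' gl ac S dead w hac hS hw hwok hdead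
      · have hpnw : p ∉ w := h2
        have hmemac : ([p.1, p.2] : List Int) ∉ ac := by
          rw [hac, show ([p.1, p.2] : List Int) = pvEnc p from rfl, pvEnc_mem]
          exact hpnw
        have hpok : pvOk bd c p = true := by simp [pvOk, hpinb, hcell]
        obtain ⟨C, FG, S1, hl, hcg, hbfs, hFGhl, hS1mem, hCok, hCnw, hclosed, hsC⟩ :=
          pvSeed bd c w p S hw hwok (fun y => hS y) hpok hpnw
        have hcontB : ¬ PySem.Set.contains S (p.1, p.2) = true := by
          intro hcc
          apply hpnw
          rw [← hS p]
          simpa [PySem.Set.contains] using hcc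
        have hstA : pvStepA bd c (gl, ac) p =
            (gl ++ [(C.map pvEnc, FG)], ac ++ C.map pvEnc) := by
          unfold pvStepA
          rw [if_neg h1, if_neg hmemac]
          dsimp only
          rw [show pvCheckGroup bd [[p.1, p.2]] [] c 26 =
            pvCheckGroup bd [pvEnc p] [] c 26 from rfl, hcg]
        have hstB : pvStepB bd c (S, dead) p =
            (S1, if hl then dead else dead ++ C.map pvEnc) := by
          unfold pvStepB
          rw [if_neg (by rintro (h | h); exact h hcell; exact hcontB h)]
          dsimp only
          rw [show pvBfs bd c 26 [(p.1, p.2)] (PySem.Set.add S (p.1, p.2)) [[p.1, p.2]] false =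
            pvBfs bd c 26 [p] (PySem.Set.add S p) [pvEnc p] false from rfl, hbfs]
        rw [hstA, hstB]
        have hdead' : (if hl then dead else dead ++ C.map pvEnc) =
            pvDeadOf (gl ++ [(C.map pvEnc, FG)]) := by
          unfold pvDeadOf
          rw [List.foldl_append]
          rw [show (gl.foldl (fun d it => if it.2 ≠ [] then d else d ++ it.1) []) = dead from by
            rw [hdead]; rfl]
          rw [List.foldl_cons, List.foldl_nil]
          dsimp only
          by_cases hhl : hl = true
          · rw [if_pos hhl, if_pos (show FG ≠ [] from fun h0 => by
              rw [hFGhl.1 h0] at hhl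
              exact Bool.false_ne_true hhl)]
          · have hlf : hl = false := by
              cases hl
              · rfl
              · exact absurd rfl hhl
            rw [if_neg (show ¬ FG ≠ [] from by rw [hFGhl.2 hlf]; simp), if_neg hhl]
        rw [hdead']
        refine ih hseeds' _ _ _ _ (w ++ C) ?_ ?_ ?_ ?_ rfl
        · rw [hac, List.map_append]
        · intro y
          rw [hS1mem y, List.mem_append]
        · exact hclosed
        · intro q hq
          rcases List.mem_append.1 hq with h | h
          · exact hwok q h
          · exact hCok q h

-- ===== VERDICT (by name: the statement is the Claim_ definition above) =====
theorem identify_dead_spec : Claim_equal_identify_dead := by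
  intro board iden _ _
  unfold Spec_identify_dead
  rw [pvA_as_seeds, pvB_as_seeds]
  obtain ⟨w1, h1, h2, h3, h4, h5⟩ := pvOuter board iden pvSeeds (by decide)
    [] [] PySem.Set.empty [] [] rfl (by simp [PySem.Set.empty]) (by intro p hp; simp at hp)
    (by intro p hp; simp at hp) rfl
  exact h5.symm
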